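-- pv_equiv track=rewrite | github.com/EgorLevi/postfix_calc | funcs.py | get_array_from_string
-- ===== SOURCE A (Python) =====
-- def get_array_from_string(str_inputed):
--     a =[]
--     temsrt = ""
--     opers = ['+','-','/','*']
--     for item in str_inputed:
--
--         if item in opers:
--             a.append(temsrt)
--             a.append(item)
--             temsrt = ""
--         else:
--             temsrt += item
--     a.append(temsrt)
--     return a
-- ===== SOURCE B (Python) =====
-- import re
--
-- def get_array_from_string(str_inputed):
--     # One regex pass: the capturing class makes each operator its own token
--     # and preserves the empty tokens A emits between adjacent operators/ends.
--     return re.split(r'([-+/*])', str_inputed)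
-- ===== Notes on version B (the rewrite author's own statement) =====
-- stated objective: idiomatic
-- what changed: Replaces the manual character-by-character accumulation loop (explicit token buffer and list appends) with a single regex split whose capturing operator class yields the operators as their own tokens.
import Mathlib
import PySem

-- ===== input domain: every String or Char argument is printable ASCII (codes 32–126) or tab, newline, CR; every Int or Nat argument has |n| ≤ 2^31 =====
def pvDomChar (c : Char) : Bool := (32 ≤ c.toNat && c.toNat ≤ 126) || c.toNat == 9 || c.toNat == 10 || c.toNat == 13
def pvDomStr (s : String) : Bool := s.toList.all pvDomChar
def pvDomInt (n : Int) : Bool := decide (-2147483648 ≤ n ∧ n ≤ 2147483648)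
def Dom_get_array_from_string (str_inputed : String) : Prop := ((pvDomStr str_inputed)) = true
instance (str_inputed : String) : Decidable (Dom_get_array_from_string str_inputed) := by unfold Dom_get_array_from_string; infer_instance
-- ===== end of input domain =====

-- B replaces A's character-by-character accumulation loop with a single
-- regex split capturing the delimiters (objective: idiomatic).

-- ===== PORT A =====
-- step of A's for-loop: state is (a, temsrt)
def pvStepA (st : List String × String) (item : Char) : List String × String :=
  let opers : List Char := ['+', '-', '/', '*']
  if item ∈ opers then (st.1 ++ [st.2, item.toString], "")
  else (st.1, st.2.push item)

def get_array_from_string (str_inputed : String) : List String :=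
  let st := str_inputed.toList.foldl pvStepA ([], "")
  st.1 ++ [st.2]

-- ===== PORT B =====
def pvIsOp (c : Char) : Bool := c == '+' || c == '-' || c == '/' || c == '*'

-- hand port of re.split(r'([-+/*])', s), exact for this single-character
-- capturing class: find the next delimiter, emit the text before it and the
-- delimiter itself, continue after it; the final piece is the remainder.
def pvReSplit (cs : List Char) : List (List Char) :=
  let pre := cs.takeWhile (fun c => !pvIsOp c)
  let rest := cs.dropWhile (fun c => !pvIsOp c)
  if hr : rest = [] then [pre]
  else pre :: [rest.head!] :: pvReSplit rest.tail
termination_by cs.length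
decreasing_by
  have hle : (cs.dropWhile (fun c => !pvIsOp c)).length ≤ cs.length :=
    List.length_dropWhile_le _ _
  have hpos : 0 < (cs.dropWhile (fun c => !pvIsOp c)).length :=
    List.length_pos_of_ne_nil hr
  simp [List.length_tail]
  omega

def get_array_from_string_alt (str_inputed : String) : List String :=
  (pvReSplit str_inputed.toList).map String.ofList

-- ===== PRECONDITION & SPEC =====
def Spec_get_array_from_string (str_inputed : String) (out : List String) : Prop := out = get_array_from_string_alt str_inputed
instance (str_inputed : String) (out : List String) : Decidable (Spec_get_array_from_string str_inputed out) := by unfold Spec_get_array_from_string; infer_instance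

-- ===== CLAIM (what is proved, stated in full; the proofs are below) =====
def Claim_equal_get_array_from_string : Prop := ∀ (str_inputed : String), Dom_get_array_from_string str_inputed → Spec_get_array_from_string str_inputed (get_array_from_string str_inputed)

-- ===== LEMMAS AND PROOFS =====

-- prepend a string to the first token
def pvConsHead (cur : String) : List String → List String
  | [] => [cur]
  | t :: ts => (cur ++ t) :: ts

theorem pvReSplit_ne_nil (cs : List Char) : pvReSplit cs ≠ [] := by
  rw [pvReSplit]
  split <;> simp

theorem pvReSplit_cons_op (c : Char) (cs : List Char) (h : pvIsOp c = true) :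
    pvReSplit (c :: cs) = [] :: [c] :: pvReSplit cs := by
  conv_lhs => rw [pvReSplit]
  simp [h]

theorem pvReSplit_cons_nonop (c : Char) (cs : List Char) (h : pvIsOp c = false) :
    pvReSplit (c :: cs) =
      match pvReSplit cs with
      | [] => [[c]]
      | t :: ts => (c :: t) :: ts := by
  rcases hr : List.dropWhile (fun c => !pvIsOp c) cs with _ | ⟨d, tl⟩ <;>
  · conv_lhs => rw [pvReSplit]
    conv_rhs => rw [pvReSplit]
    simp [h, hr]

theorem pvMem_opers_iff (c : Char) :
    (c ∈ (['+', '-', '/', '*'] : List Char)) ↔ pvIsOp c = true := by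
  simp [pvIsOp]
  tauto

theorem pvLoop_eq (cs : List Char) : ∀ (a : List String) (cur : String),
    (let st := cs.foldl pvStepA (a, cur); st.1 ++ [st.2]) =
      a ++ pvConsHead cur ((pvReSplit cs).map String.ofList) := by
  induction cs with
  | nil =>
    intro a cur
    simp [pvReSplit, pvConsHead]
  | cons c cs ih =>
    intro a cur
    by_cases h : pvIsOp c = true
    · have hm : c ∈ (['+', '-', '/', '*'] : List Char) := (pvMem_opers_iff c).mpr h
      simp only [List.foldl_cons, pvStepA, if_pos hm]
      rw [ih]
      rw [pvReSplit_cons_op c cs h]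
      rcases hg : pvReSplit cs with _ | ⟨t, ts⟩
      · exact absurd hg (pvReSplit_ne_nil cs)
      · have e1 : cur ++ String.ofList [] = cur := by
          apply String.toList_inj.mp; simp
        have e2 : String.ofList [c] = c.toString := by
          apply String.toList_inj.mp; simp [Char.toString]
        have e3 : "" ++ String.ofList t = String.ofList t := by
          apply String.toList_inj.mp; simp
        simp only [List.map_cons, pvConsHead, List.append_assoc, List.cons_append,
          List.nil_append, e1, e2, e3]
    · have h' : pvIsOp c = false := by simpa using h
      have hm : c ∉ (['+', '-', '/', '*'] : List Char) := by
        rw [pvMem_opers_iff]; simp [h']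
      simp only [List.foldl_cons, pvStepA, if_neg hm]
      rw [ih]
      rw [pvReSplit_cons_nonop c cs h']
      rcases hg : pvReSplit cs with _ | ⟨t, ts⟩
      · exact absurd hg (pvReSplit_ne_nil cs)
      · simp only [List.map_cons, pvConsHead]
        congr 2
        apply String.toList_inj.mp
        simp
      
-- ===== VERDICT (by name: the statement is the Claim_ definition above) =====
theorem get_array_from_string_spec : Claim_equal_get_array_from_string := by
  intro s _
  unfold Spec_get_array_from_string get_array_from_string get_array_from_string_alt
  rw [pvLoop_eq s.toList [] ""]
  rcases hg : pvReSplit s.toList with _ | ⟨t, ts⟩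
  · exact absurd hg (pvReSplit_ne_nil s.toList)
  · simp [pvConsHead]
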